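-- pv_equiv track=rewrite | github.com/Fuwaki/InkTrace | graph_reconstruction.py | get_continuous_paths
-- ===== SOURCE A (Python) =====
-- def get_continuous_paths(curves):
--     """Group curves by path_id"""
--     if not curves:
--         return []
--     path_dict = {}
--     for curve in curves:
--         pid = curve.get("path_id", 0)
--         if pid not in path_dict:
--             path_dict[pid] = []
--         path_dict[pid].append(curve)
--
--     paths = []
--     for pid in sorted(path_dict.keys()):
--         paths.append(sorted(path_dict[pid], key=lambda c: c.get("path_order", 0)))
--     return paths
-- ===== SOURCE B (Python) =====
-- def get_continuous_paths(curves):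
--     """Group curves by path_id"""
--     pids = sorted({c.get("path_id", 0) for c in curves})
--     return [
--         sorted(
--             [c for c in curves if c.get("path_id", 0) == pid],
--             key=lambda c: c.get("path_order", 0),
--         )
--         for pid in pids
--     ]
-- ===== Notes on version B (the rewrite author's own statement) =====
-- stated objective: simpler
-- what changed: Replaces A's dict-accumulation pass (insert-empty-then-append, then iterate sorted keys) by computing the sorted set of path_ids once and filtering the input per id, dropping the empty-input guard; same return value everywhere.
import Mathlib
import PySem

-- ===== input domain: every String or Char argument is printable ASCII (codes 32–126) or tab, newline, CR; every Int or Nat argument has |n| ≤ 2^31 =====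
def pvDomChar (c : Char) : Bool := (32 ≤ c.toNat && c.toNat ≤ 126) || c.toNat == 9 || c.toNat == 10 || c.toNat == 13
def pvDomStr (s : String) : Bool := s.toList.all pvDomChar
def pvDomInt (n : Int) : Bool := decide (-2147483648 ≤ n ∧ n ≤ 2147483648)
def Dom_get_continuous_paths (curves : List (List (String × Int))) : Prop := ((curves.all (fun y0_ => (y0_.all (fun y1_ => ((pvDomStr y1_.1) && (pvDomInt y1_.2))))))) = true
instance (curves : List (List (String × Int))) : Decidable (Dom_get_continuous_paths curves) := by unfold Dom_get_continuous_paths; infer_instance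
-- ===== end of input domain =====

-- B replaces A's one-pass dict accumulation by "sorted distinct path_ids, then filter per id"
-- (objective: simpler — no dict, no empty guard; same return value on every input).

-- curve.get(k, 0) on an association-list curve (first-match lookup, default 0); used by both ports
def curveGet (curve : List (String × Int)) (k : String) : Int :=
  PySem.Dict.getD (PySem.Dict.mk curve) k 0

-- ===== PORT A =====
def get_continuous_paths (curves : List (List (String × Int))) : List (List (List (String × Int))) :=
  if curves = [] then []
  else
    let path_dict : PySem.Dict Int (List (List (String × Int))) :=
      curves.foldl (fun d curve =>
        let pid := curveGet curve "path_id"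
        -- if pid not in path_dict: path_dict[pid] = []
        let d := if PySem.Dict.contains d pid = false then PySem.Dict.insert d pid [] else d
        -- path_dict[pid].append(curve): key pid is present here, so modify with default [] is exact
        PySem.Dict.modify d pid [] (fun l => l ++ [curve])) PySem.Dict.empty
    -- for pid in sorted(path_dict.keys()): paths.append(sorted(path_dict[pid], key=...))
    -- path_dict[pid] with pid ∈ keys: getD with default [] is exact (key always present)
    (PySem.List.sorted (PySem.Dict.keys path_dict) (fun x => x) false).foldl
      (fun paths pid =>
        paths ++ [PySem.List.sorted (PySem.Dict.getD path_dict pid [])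
                    (fun c => curveGet c "path_order") false]) []

-- ===== PORT B =====
def get_continuous_paths_alt (curves : List (List (String × Int))) : List (List (List (String × Int))) :=
  let pids := PySem.List.sorted (PySem.Set.ofList (curves.map (fun c => curveGet c "path_id")))
                (fun x => x) false
  pids.map (fun pid =>
    PySem.List.sorted (curves.filter (fun c => curveGet c "path_id" == pid))
      (fun c => curveGet c "path_order") false)

-- ===== PRECONDITION & SPEC =====
def Spec_get_continuous_paths (curves : List (List (String × Int))) (out : List (List (List (String × Int)))) : Prop := out = get_continuous_paths_alt curves
instance (curves : List (List (String × Int))) (out : List (List (List (String × Int)))) : Decidable (Spec_get_continuous_paths curves out) := by unfold Spec_get_continuous_paths; infer_instance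

-- ===== CLAIM (what is proved, stated in full; the proofs are below) =====
def Claim_equal_get_continuous_paths : Prop := ∀ (curves : List (List (String × Int))), Dom_get_continuous_paths curves → Spec_get_continuous_paths curves (get_continuous_paths curves)

-- ===== LEMMAS AND PROOFS =====

-- A's loop step ("insert [] if missing, then append") is the plain grouping modify step
theorem step_eq_modify (d : PySem.Dict Int (List (List (String × Int)))) (pid : Int)
    (curve : List (String × Int)) :
    PySem.Dict.modify
      (if PySem.Dict.contains d pid = false then PySem.Dict.insert d pid [] else d)
      pid [] (fun l => l ++ [curve])
    = PySem.Dict.modify d pid [] (fun l => l ++ [curve]) := by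
  by_cases h : PySem.Dict.contains d pid = false
  · simp only [h, if_true, PySem.Dict.modify, PySem.Dict.getD_insert_self,
      PySem.Dict.insert_insert_self, PySem.Dict.getD_of_not_contains d [] h]
  · simp [h]

-- the dict A builds looks up to exactly B's filter
theorem getD_build (curves : List (List (String × Int))) (k : Int) :
    PySem.Dict.getD
      (curves.foldl (fun d curve =>
        let pid := curveGet curve "path_id"
        let d := if PySem.Dict.contains d pid = false then PySem.Dict.insert d pid [] else d
        PySem.Dict.modify d pid [] (fun l => l ++ [curve])) PySem.Dict.empty) k []
    = curves.filter (fun c => curveGet c "path_id" == k) := by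
  have hstep : (fun (d : PySem.Dict Int (List (List (String × Int)))) curve =>
      let pid := curveGet curve "path_id"
      let d := if PySem.Dict.contains d pid = false then PySem.Dict.insert d pid [] else d
      PySem.Dict.modify d pid [] (fun l => l ++ [curve]))
      = fun d curve => PySem.Dict.modify d (curveGet curve "path_id") [] (fun l => l ++ [curve]) :=
    funext fun d => funext fun c => step_eq_modify d (curveGet c "path_id") c
  rw [hstep]
  have hmap : curves.foldl
      (fun d curve => PySem.Dict.modify d (curveGet curve "path_id") [] (fun l => l ++ [curve]))
      PySem.Dict.empty
      = (curves.map (fun c => (curveGet c "path_id", c))).foldl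
          (fun d p => PySem.Dict.modify d p.1 [] (fun l => l ++ [p.2])) PySem.Dict.empty := by
    rw [List.foldl_map]
  rw [hmap, PySem.Dict.getD_foldl_modify_append, PySem.Dict.getD_empty, List.nil_append,
    List.filter_map, List.map_map]
  simp [Function.comp_def]

-- the keys of the dict A builds are set(map path_id curves), in first-occurrence order
theorem keys_build (curves : List (List (String × Int))) :
    PySem.Dict.keys
      (curves.foldl (fun d curve =>
        let pid := curveGet curve "path_id"
        let d := if PySem.Dict.contains d pid = false then PySem.Dict.insert d pid [] else d
        PySem.Dict.modify d pid [] (fun l => l ++ [curve])) PySem.Dict.empty)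
    = PySem.Set.ofList (curves.map (fun c => curveGet c "path_id")) := by
  have hstep : (fun (d : PySem.Dict Int (List (List (String × Int)))) curve =>
      let pid := curveGet curve "path_id"
      let d := if PySem.Dict.contains d pid = false then PySem.Dict.insert d pid [] else d
      PySem.Dict.modify d pid [] (fun l => l ++ [curve]))
      = fun d curve => PySem.Dict.modify d (curveGet curve "path_id") [] (fun l => l ++ [curve]) :=
    funext fun d => funext fun c => step_eq_modify d (curveGet c "path_id") c
  rw [hstep,
    PySem.Dict.keys_foldl_modify_key curves (fun c => curveGet c "path_id") []
      (fun _ c l => l ++ [c]) PySem.Dict.empty,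
    PySem.Dict.keys_empty, PySem.Set.update_nil_left]

-- ===== VERDICT (by name: the statement is the Claim_ definition above) =====
theorem get_continuous_paths_spec : Claim_equal_get_continuous_paths := by
  intro curves _
  unfold Spec_get_continuous_paths get_continuous_paths get_continuous_paths_alt
  by_cases hnil : curves = []
  · subst hnil; rfl
  · simp only [hnil, if_false, PySem.List.foldl_append_singleton_eq_map, List.nil_append,
      keys_build]
    exact List.map_congr_left fun pid _ => by rw [getD_build]
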